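-- pv_equiv track=rewrite | github.com/laclustr/CSP | Problem Sets/CSP-Pset3/grant_vance_pset3.py | adj_brightness
-- ===== SOURCE A (Python) =====
-- def limit_255(image):
-- 	lim_img = []
-- 	for row in image:
-- 		new_row = []
-- 		for px in row:
-- 			new_row += [255] if px >= 255 else [px]
-- 		lim_img.append(new_row)
-- 	return lim_img
--
-- def adj_brightness(image, adjustment):
-- 	new_img = []
-- 	for row in image:
-- 		new_row = []
-- 		for px in row:
-- 			new_row.append(px + adjustment)
-- 		new_img.append(new_row)
-- 	return limit_255(new_img)
-- ===== SOURCE B (Python) =====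
-- def adj_brightness(image, adjustment):
--     return [[min(px + adjustment, 255) for px in row] for row in image]
-- ===== Notes on version B (the rewrite author's own statement) =====
-- stated objective: simpler
-- what changed: Fused A's two full-image passes (brighten, then clamp in the limit_255 helper) into a single nested comprehension using min(px+adjustment, 255), removing the intermediate image and the helper.
import Mathlib
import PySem

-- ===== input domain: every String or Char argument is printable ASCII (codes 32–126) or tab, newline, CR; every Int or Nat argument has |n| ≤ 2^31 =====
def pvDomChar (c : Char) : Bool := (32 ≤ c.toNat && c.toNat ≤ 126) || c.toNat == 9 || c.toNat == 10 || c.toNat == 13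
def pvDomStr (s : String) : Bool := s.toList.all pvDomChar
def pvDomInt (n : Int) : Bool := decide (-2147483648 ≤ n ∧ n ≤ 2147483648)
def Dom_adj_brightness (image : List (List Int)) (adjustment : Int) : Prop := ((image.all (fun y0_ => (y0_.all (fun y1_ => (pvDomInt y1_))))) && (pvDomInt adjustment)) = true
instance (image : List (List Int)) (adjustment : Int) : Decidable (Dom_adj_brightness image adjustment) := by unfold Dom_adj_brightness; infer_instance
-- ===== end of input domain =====

-- B fuses A's brighten pass and the limit_255 clamp pass into one nested comprehension (simpler; return value only).

-- ===== PORT A =====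
def limit_255 (image : List (List Int)) : List (List Int) :=
  image.foldl (fun lim_img row =>
    lim_img ++ [row.foldl (fun new_row px =>
      new_row ++ (if px ≥ 255 then [255] else [px])) []]) []

def adj_brightness (image : List (List Int)) (adjustment : Int) : List (List Int) :=
  limit_255 (image.foldl (fun new_img row =>
    new_img ++ [row.foldl (fun new_row px => new_row ++ [px + adjustment]) []]) [])

-- ===== PORT B =====
def adj_brightness_alt (image : List (List Int)) (adjustment : Int) : List (List Int) :=
  image.map (fun row => row.map (fun px => min (px + adjustment) 255))

-- ===== PRECONDITION & SPEC =====
def Spec_adj_brightness (image : List (List Int)) (adjustment : Int) (out : List (List Int)) : Prop := out = adj_brightness_alt image adjustment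
instance (image : List (List Int)) (adjustment : Int) (out : List (List Int)) : Decidable (Spec_adj_brightness image adjustment out) := by unfold Spec_adj_brightness; infer_instance

-- ===== CLAIM (what is proved, stated in full; the proofs are below) =====
def Claim_equal_adj_brightness : Prop := ∀ (image : List (List Int)) (adjustment : Int), Dom_adj_brightness image adjustment → Spec_adj_brightness image adjustment (adj_brightness image adjustment)

-- ===== LEMMAS AND PROOFS =====

-- each foldl-with-append loop is the corresponding map
theorem foldl_append_singleton {α β : Type} (f : α → β) (xs : List α) (acc : List β) :
    xs.foldl (fun r x => r ++ [f x]) acc = acc ++ xs.map f := by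
  induction xs generalizing acc with
  | nil => simp
  | cons x xs ih => simp [List.foldl, ih]

theorem inner_clamp (row : List Int) (acc : List Int) :
    row.foldl (fun new_row px => new_row ++ (if px ≥ 255 then [255] else [px])) acc
      = acc ++ row.map (fun px => min px 255) := by
  induction row generalizing acc with
  | nil => simp
  | cons px row ih =>
      have hpx : (if px ≥ 255 then ([255] : List Int) else [px]) = [min px 255] := by
        rw [min_def]; split_ifs <;> simp <;> omega
      simp [List.foldl, ih, hpx]

theorem limit_255_eq (image : List (List Int)) :
    limit_255 image = image.map (fun row => row.map (fun px => min px 255)) := by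
  unfold limit_255
  have := foldl_append_singleton (fun row : List Int =>
    row.foldl (fun new_row px => new_row ++ (if px ≥ 255 then [255] else [px])) []) image []
  rw [this, List.nil_append]
  apply List.map_congr_left
  intro row _
  simpa using inner_clamp row []

-- ===== VERDICT (by name: the statement is the Claim_ definition above) =====
theorem adj_brightness_spec : Claim_equal_adj_brightness := by
  intro image adjustment _
  unfold Spec_adj_brightness adj_brightness adj_brightness_alt
  rw [foldl_append_singleton (fun row : List Int =>
        row.foldl (fun new_row px => new_row ++ [px + adjustment]) []) image [],
      limit_255_eq]
  simp [List.map_map, foldl_append_singleton (fun px : Int => px + adjustment)]
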